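-- pv_equiv track=rewrite | github.com/emcramer/pressure_ulcer_prediction_mimic | additional/data_processing_scripts/Labs_chart_events_preprocessing.py | process_o2
-- ===== SOURCE A (Python) =====
-- def process_o2(o2_strings):
-- 	to_return = 0
-- 	for o2_string in o2_strings:
-- 		if 'O2sat<90' in o2_string: #<90 O2 sat even with suplemental
-- 			return 2
-- 		if 'NeedsO2inhalation' in o2_string:
-- 			to_return = 1
--
-- 	return to_return
-- ===== SOURCE B (Python) =====
-- def process_o2(o2_strings):
--     if any('O2sat<90' in s for s in o2_strings):
--         return 2
--     if any('NeedsO2inhalation' in s for s in o2_strings):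
--         return 1
--     return 0
-- ===== Notes on version B (the rewrite author's own statement) =====
-- stated objective: idiomatic
-- what changed: Replaced the single flag-tracking loop with two prioritized short-circuiting any() scans (result is order-independent because the higher-priority match returns immediately).
import Mathlib
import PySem

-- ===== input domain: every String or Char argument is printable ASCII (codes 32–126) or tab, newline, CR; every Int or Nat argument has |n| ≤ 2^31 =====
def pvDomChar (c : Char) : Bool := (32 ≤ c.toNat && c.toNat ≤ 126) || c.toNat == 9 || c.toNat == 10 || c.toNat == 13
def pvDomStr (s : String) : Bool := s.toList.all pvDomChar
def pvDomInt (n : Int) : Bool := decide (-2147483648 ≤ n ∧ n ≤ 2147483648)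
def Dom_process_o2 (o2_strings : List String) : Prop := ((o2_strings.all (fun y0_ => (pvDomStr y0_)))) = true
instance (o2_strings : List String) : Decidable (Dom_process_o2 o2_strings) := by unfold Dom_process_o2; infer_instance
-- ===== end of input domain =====

-- B replaces A's flag-tracking loop with two prioritized short-circuiting scans (idiomatic; same cost).

-- ===== PORT A =====
-- A's loop with the `to_return` accumulator, transliterated as structural recursion.
def process_o2_go (rest : List String) (to_return : Int) : Int :=
  match rest with
  | [] => to_return
  | s :: rest' =>
      if PySem.Str.isIn "O2sat<90" s then 2
      else process_o2_go rest' (if PySem.Str.isIn "NeedsO2inhalation" s then 1 else to_return)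

def process_o2 (o2_strings : List String) : Int :=
  process_o2_go o2_strings 0

-- ===== PORT B =====
def process_o2_alt (o2_strings : List String) : Int :=
  if o2_strings.any (fun s => PySem.Str.isIn "O2sat<90" s) then 2
  else if o2_strings.any (fun s => PySem.Str.isIn "NeedsO2inhalation" s) then 1
  else 0

-- ===== PRECONDITION & SPEC =====
def Spec_process_o2 (o2_strings : List String) (out : Int) : Prop := out = process_o2_alt o2_strings
instance (o2_strings : List String) (out : Int) : Decidable (Spec_process_o2 o2_strings out) := by unfold Spec_process_o2; infer_instance

-- ===== CLAIM (what is proved, stated in full; the proofs are below) =====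
def Claim_equal_process_o2 : Prop := ∀ (o2_strings : List String), Dom_process_o2 o2_strings → Spec_process_o2 o2_strings (process_o2 o2_strings)

-- ===== LEMMAS AND PROOFS =====

-- Loop invariant: A's loop computes B's prioritized-scan value with the accumulator as default.
theorem process_o2_go_eq (xs : List String) (acc : Int) :
    process_o2_go xs acc =
      if xs.any (fun s => PySem.Str.isIn "O2sat<90" s) then 2
      else if xs.any (fun s => PySem.Str.isIn "NeedsO2inhalation" s) then 1
      else acc := by
  induction xs generalizing acc with
  | nil => simp [process_o2_go]
  | cons s rest ih =>
      simp only [process_o2_go]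
      by_cases h1 : PySem.Str.isIn "O2sat<90" s = true
      · rw [if_pos h1]
        have hc : ((s :: rest).any fun s => PySem.Str.isIn "O2sat<90" s) = true := by
          rw [List.any_cons, h1, Bool.true_or]
        rw [hc, if_pos rfl]
      · have h1' : PySem.Str.isIn "O2sat<90" s = false := Bool.not_eq_true _ ▸ h1
        rw [if_neg h1, ih]
        rw [List.any_cons, List.any_cons, h1', Bool.false_or]
        by_cases h2 : PySem.Str.isIn "NeedsO2inhalation" s = true
        · rw [if_pos h2, h2, Bool.true_or]
          by_cases h3 : (rest.any fun s => PySem.Str.isIn "O2sat<90" s) = true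
          · rw [if_pos h3, if_pos h3]
          · rw [if_neg h3, if_neg h3, if_pos rfl, ite_self]
        · have h2' : PySem.Str.isIn "NeedsO2inhalation" s = false := Bool.not_eq_true _ ▸ h2
          rw [if_neg h2, h2', Bool.false_or]

-- ===== VERDICT (by name: the statement is the Claim_ definition above) =====
theorem process_o2_spec : Claim_equal_process_o2 := by
  intro xs _
  unfold Spec_process_o2 process_o2 process_o2_alt
  exact process_o2_go_eq xs 0
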